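-- pv_equiv track=rewrite | github.com/liqingpeng1/script | new-socketemulator-master/lib/protocol/m300/M300Base.py | replace7e7d
-- ===== SOURCE A (Python) =====
-- def replace7e7d(data):
--     tmpR = data
--     tmp = tmpR[0:2]
--     tmpA = tmpR[0:2]
--     tmpR = tmpR[2:]
--     data = ""
--     while tmpA != "":
--         if tmp == "7d":
--             tmp = "7d01"
--         elif tmp == "7e":
--             tmp = "7d02"
--         data = data + tmp
--         tmp = tmpR[0:2]
--         tmpA = tmpR[0:2]
--         tmpR = tmpR[2:]
--     return data
-- ===== SOURCE B (Python) =====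
-- import re
--
-- _ESC = {'7d': '7d01', '7e': '7d02'}
-- _PAIR = re.compile(r'..', re.S)
--
-- def replace7e7d(data):
--     return _PAIR.sub(lambda m: _ESC.get(m.group(0), m.group(0)), data)
-- ===== Notes on version B (the rewrite author's own statement) =====
-- stated objective: faster
-- what changed: Replaced the manual while-loop that repeatedly front-slices the string and rebuilds it by quadratic concatenation with a single linear regex substitution (re.sub over non-overlapping two-character matches) driven by an escape-table lookup.
import Mathlib
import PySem

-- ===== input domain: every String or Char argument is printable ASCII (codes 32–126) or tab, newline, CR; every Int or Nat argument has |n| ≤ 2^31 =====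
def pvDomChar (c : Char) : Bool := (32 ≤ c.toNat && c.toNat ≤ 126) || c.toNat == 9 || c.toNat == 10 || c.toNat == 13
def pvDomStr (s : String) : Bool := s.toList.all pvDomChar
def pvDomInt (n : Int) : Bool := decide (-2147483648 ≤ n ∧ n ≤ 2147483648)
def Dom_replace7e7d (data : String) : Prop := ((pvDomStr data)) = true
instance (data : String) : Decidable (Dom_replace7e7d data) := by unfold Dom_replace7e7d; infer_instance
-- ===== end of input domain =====

-- B replaces A's front-slicing while-loop (three mutated state variables) with one
-- linear regex substitution over non-overlapping two-character chunks using an escape table (objective: faster; measured).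

-- ===== PORT A =====
-- A's while-loop: state tmp/tmpA (current 2-char chunk, kept twice) and tmpR (rest),
-- accumulating into data.  Chunks are List Char (PySem string convention).
def replace7e7dLoop (tmp tmpA tmpR acc : List Char) : List Char :=
  if tmpA = [] then acc
  else
    let tmp' := if tmp = ['7','d'] then ['7','d','0','1']
                else if tmp = ['7','e'] then ['7','d','0','2']
                else tmp
    replace7e7dLoop (tmpR.take 2) (tmpR.take 2) (tmpR.drop 2) (acc ++ tmp')
  termination_by tmpA.length + tmpR.length
  decreasing_by
    rename_i h
    have h1 : 0 < tmpA.length := List.length_pos_iff.mpr h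
    simp [List.length_take, List.length_drop]
    omega

def replace7e7d (data : String) : String :=
  String.ofList (replace7e7dLoop (data.toList.take 2) (data.toList.take 2) (data.toList.drop 2) [])

-- ===== PORT B =====
-- B's escape table {'7d': '7d01', '7e': '7d02'} as a PySem.Dict keyed by 2-char chunks.
def escTable : PySem.Dict (List Char) (List Char) :=
  (PySem.Dict.empty.insert ['7','d'] ['7','d','0','1']).insert ['7','e'] ['7','d','0','2']

-- re.sub(r'..', repl, data, flags=re.S): the regex engine consumes the string in
-- non-overlapping two-character matches, replacing each by the table lookup (default:
-- the match itself); a trailing single character cannot match and is left as is.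
def sub2 : List Char → List Char
  | a :: b :: rest => escTable.getD [a, b] [a, b] ++ sub2 rest
  | rest => rest

def replace7e7d_alt (data : String) : String :=
  String.ofList (sub2 data.toList)

-- ===== PRECONDITION & SPEC =====
def Spec_replace7e7d (data : String) (out : String) : Prop := out = replace7e7d_alt data
instance (data : String) (out : String) : Decidable (Spec_replace7e7d data out) := by unfold Spec_replace7e7d; infer_instance

-- ===== CLAIM (what is proved, stated in full; the proofs are below) =====
def Claim_equal_replace7e7d : Prop := ∀ (data : String), Dom_replace7e7d data → Spec_replace7e7d data (replace7e7d data)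

-- ===== LEMMAS AND PROOFS =====

-- A's transform of one chunk equals B's table lookup with default.
lemma escTable_getD_eq (t : List Char) :
    escTable.getD t t =
      (if t = ['7','d'] then ['7','d','0','1']
       else if t = ['7','e'] then ['7','d','0','2'] else t) := by
  by_cases h1 : t = ['7','d']
  · subst h1; decide
  · by_cases h2 : t = ['7','e']
    · subst h2; decide
    · have b1 : ((['7','d'] : List Char) == t) = false := by
        simpa [beq_iff_eq] using fun h => h1 h.symm
      have b2 : ((['7','e'] : List Char) == t) = false := by
        simpa [beq_iff_eq] using fun h => h2 h.symm
      simp [escTable, PySem.Dict.getD, PySem.Dict.get?, PySem.Dict.insert,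
        PySem.Dict.empty, List.find?, b1, b2, h1, h2]

-- Loop invariant: the loop started on the chunking of cs appends sub2 cs to the accumulator.
lemma replace7e7dLoop_eq (n : Nat) :
    ∀ (cs acc : List Char), cs.length ≤ n →
      replace7e7dLoop (cs.take 2) (cs.take 2) (cs.drop 2) acc = acc ++ sub2 cs := by
  induction n with
  | zero =>
    intro cs acc h
    have : cs = [] := List.eq_nil_of_length_eq_zero (Nat.le_zero.mp h)
    subst this
    simp [replace7e7dLoop, sub2]
  | succ n ih =>
    intro cs acc h
    match cs with
    | [] => simp [replace7e7dLoop, sub2]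
    | [a] =>
      rw [replace7e7dLoop]
      have hne : ([a].take 2 : List Char) ≠ [] := by simp
      have ha : ([a] : List Char).take 2 = [a] := by simp
      simp only [ha, List.drop, if_neg (by simp : ([a] : List Char) ≠ [])]
      have h7d : ([a] : List Char) ≠ ['7','d'] := by simp
      have h7e : ([a] : List Char) ≠ ['7','e'] := by simp
      rw [replace7e7dLoop]
      simp [h7d, h7e, sub2]
    | a :: b :: rest =>
      rw [replace7e7dLoop]
      simp only [List.take, List.drop, if_neg (by simp : ([a,b] : List Char) ≠ [])]
      rw [ih rest _ (by simp at h; omega)]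
      rw [sub2, escTable_getD_eq]
      simp [List.append_assoc]

-- ===== VERDICT (by name: the statement is the Claim_ definition above) =====
theorem replace7e7d_spec : Claim_equal_replace7e7d := by
  intro data _
  unfold Spec_replace7e7d replace7e7d replace7e7d_alt
  rw [replace7e7dLoop_eq data.toList.length data.toList [] (le_refl _)]
  simp
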